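-- pv_equiv track=rewrite | github.com/RasmusRendal/Cryptanalysis | SubstitutionSolver.py | get_doubles
-- ===== SOURCE A (Python) =====
-- def get_doubles(text):
--     doubles = {}
--     for word in text.split(' '):
--         last_char = ''
--         for c in word:
--             if c == last_char:
--                 if c in doubles:
--                     doubles[c] += 1
--                 else:
--                     doubles[c] = 1
--             last_char = c
--     return doubles
-- ===== SOURCE B (Python) =====
-- def get_doubles(text):
--     doubles = {}
--     for word in text.split(' '):
--         i = 0
--         n = len(word)
--         while i < n:
--             j = i + 1
--             while j < n and word[j] == word[i]:
--                 j += 1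
--             if j - i > 1:
--                 doubles[word[i]] = doubles.get(word[i], 0) + (j - i - 1)
--             i = j
--     return doubles
-- ===== Notes on version B (the rewrite author's own statement) =====
-- stated objective: alternative
-- what changed: Replaces the per-character last_char comparison loop with a two-pointer run-length scan: each maximal run of equal characters is measured once and its length-1 is added to the count in a single dict update.
import Mathlib
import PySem

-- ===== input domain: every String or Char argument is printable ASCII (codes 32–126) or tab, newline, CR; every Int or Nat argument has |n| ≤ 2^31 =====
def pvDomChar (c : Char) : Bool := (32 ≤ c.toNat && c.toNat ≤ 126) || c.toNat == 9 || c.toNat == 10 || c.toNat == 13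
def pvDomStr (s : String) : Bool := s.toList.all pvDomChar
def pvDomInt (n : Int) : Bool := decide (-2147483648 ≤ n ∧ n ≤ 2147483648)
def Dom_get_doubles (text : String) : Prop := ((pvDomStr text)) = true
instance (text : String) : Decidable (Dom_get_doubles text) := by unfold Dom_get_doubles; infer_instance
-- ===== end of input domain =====

-- B replaces A's per-character last_char comparison with a two-pointer run-length scan
-- (one dict update per maximal run); same cost, alternative traversal.

-- ===== PORT A =====
-- inner for-loop of A: state (doubles, last_char), one step per character
def aWordLoop (st : PySem.Dict String Int × String) (w : List Char) :
    PySem.Dict String Int × String :=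
  w.foldl (fun st c =>
    let s := String.ofList [c]
    (if s == st.2 then
        (if st.1.contains s then st.1.modify s 0 (· + 1) else st.1.insert s 1)
      else st.1, s)) st

def get_doubles (text : String) : List (String × Int) :=
  ((PySem.Chars.splitOn text.toList [' ']).foldl
    (fun d w => (aWordLoop (d, "") w).1) PySem.Dict.empty).items

-- ===== PORT B =====
-- Source B's inner while-loops: scan the maximal run starting at the current position
-- (run = chars equal to the first, rest = remainder), add run length - 1 when ≥ 1
def bWord (d : PySem.Dict String Int) (w : List Char) : PySem.Dict String Int :=
  match w with
  | [] => d
  | c :: cs =>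
    let run := cs.takeWhile (· == c)
    let rest := cs.dropWhile (· == c)
    let s := String.ofList [c]
    bWord (if run.length > 0 then d.insert s (d.getD s 0 + (run.length : Int)) else d) rest
termination_by w.length
decreasing_by
  simp only [List.length_cons]
  exact Nat.lt_succ_of_le (List.length_dropWhile_le _ _)

def get_doubles_alt (text : String) : List (String × Int) :=
  ((PySem.Chars.splitOn text.toList [' ']).foldl bWord PySem.Dict.empty).items

-- ===== PRECONDITION & SPEC =====
def Spec_get_doubles (text : String) (out : List (String × Int)) : Prop := out = get_doubles_alt text
instance (text : String) (out : List (String × Int)) : Decidable (Spec_get_doubles text out) := by unfold Spec_get_doubles; infer_instance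

-- ===== CLAIM (what is proved, stated in full; the proofs are below) =====
def Claim_equal_get_doubles : Prop := ∀ (text : String), Dom_get_doubles text → Spec_get_doubles text (get_doubles text)

-- ===== LEMMAS AND PROOFS =====

theorem sOf_inj {a b : Char} (h : String.ofList [a] = String.ofList [b]) : a = b := by
  have := congrArg String.toList h; simpa using this

theorem sOf_ne_empty (c : Char) : (String.ofList [c] == "") = false := by
  simp only [beq_eq_false_iff_ne, ne_eq]
  intro h; have := congrArg String.toList h; simp at this

theorem dict_insert_insert (d : PySem.Dict String Int) (k : String) (v w : Int) :
    (d.insert k v).insert k w = d.insert k w := by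
  have h1 : (d.insert k v).contains k = true := PySem.Dict.contains_insert_self d k v
  cases hd : d.contains k with
  | true =>
    simp only [PySem.Dict.insert, hd, if_true] at h1 ⊢
    rw [if_pos h1]
    congr 1
    rw [List.map_map]
    apply List.map_congr_left
    intro p _
    by_cases hp : p.1 = k <;> simp [hp]
  | false =>
    simp only [PySem.Dict.insert, hd, Bool.false_eq_true, if_false] at h1 ⊢
    rw [if_pos h1]
    congr 1
    rw [List.map_append]
    have hall : ∀ p ∈ d.items, (p.1 == k) = false := by
      intro p hp
      simp [PySem.Dict.contains] at hd
      simpa using hd p.1 p.2 (by simpa using hp)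
    rw [List.map_congr_left (g := id) (fun p hp => by simp [hall p hp]), List.map_id]
    simp

-- one A-step on a repeated character is a single insert
theorem aIncr_eq (d : PySem.Dict String Int) (s : String) :
    (if d.contains s then d.modify s 0 (· + 1) else d.insert s 1) =
      d.insert s (d.getD s 0 + 1) := by
  cases hd : d.contains s with
  | true => rfl
  | false =>
    rw [if_neg (by simp [hd]), PySem.Dict.getD_of_not_contains d 0 hd]
    norm_num

def incrIter (c : Char) : Nat → PySem.Dict String Int → PySem.Dict String Int
  | 0, d => d
  | k + 1, d =>
    incrIter c k (d.insert (String.ofList [c]) (d.getD (String.ofList [c]) 0 + 1))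

theorem incrIter_closed (c : Char) (k : Nat) (d : PySem.Dict String Int) :
    incrIter c k d =
      if k = 0 then d
      else d.insert (String.ofList [c]) (d.getD (String.ofList [c]) 0 + (k : Int)) := by
  induction k generalizing d with
  | zero => simp [incrIter]
  | succ k ih =>
    rw [incrIter, ih]
    cases k with
    | zero => simp
    | succ m =>
      rw [if_neg (by omega), if_neg (by omega), dict_insert_insert,
        PySem.Dict.getD_insert_self]
      congr 1
      push_cast
      ring

theorem aWordLoop_run (c : Char) (k : Nat) (d : PySem.Dict String Int) (rest : List Char) :
    aWordLoop (d, String.ofList [c]) (List.replicate k c ++ rest) =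
      aWordLoop (incrIter c k d, String.ofList [c]) rest := by
  induction k generalizing d with
  | zero => simp [incrIter]
  | succ k ih =>
    rw [List.replicate_succ, List.cons_append]
    show aWordLoop (_, _) _ = _
    unfold aWordLoop
    simp only [List.foldl_cons, BEq.rfl, if_true]
    rw [aIncr_eq]
    exact ih _

theorem aWordLoop_skip (x : Char) (xs : List Char) (d : PySem.Dict String Int)
    (l l' : String) (h : (String.ofList [x] == l) = false)
    (h' : (String.ofList [x] == l') = false) :
    aWordLoop (d, l) (x :: xs) = aWordLoop (d, l') (x :: xs) := by
  unfold aWordLoop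
  simp only [List.foldl_cons, h, h', Bool.false_eq_true, if_false]

theorem word_equiv (n : Nat) : ∀ (w : List Char) (d : PySem.Dict String Int),
    w.length ≤ n → (aWordLoop (d, "") w).1 = bWord d w := by
  induction n with
  | zero =>
    intro w d hw
    rw [List.length_eq_zero_iff.mp (Nat.le_zero.mp hw)]
    simp [aWordLoop, bWord]
  | succ n ih =>
    intro w d hw
    cases w with
    | nil => simp [aWordLoop, bWord]
    | cons c cs =>
      have hrep : cs.takeWhile (· == c) = List.replicate ((cs.takeWhile (· == c)).length) c := by
        apply List.eq_replicate_of_mem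
        intro b hb
        have := List.mem_takeWhile_imp hb
        simpa using this
      have hsplit : cs = List.replicate ((cs.takeWhile (· == c)).length) c ++ cs.dropWhile (· == c) := by
        conv_lhs => rw [← List.takeWhile_append_dropWhile (p := (· == c)) (l := cs)]
        rw [← hrep]
      have h1 : aWordLoop (d, "") (c :: cs) = aWordLoop (d, String.ofList [c]) cs := by
        unfold aWordLoop
        simp only [List.foldl_cons, sOf_ne_empty, Bool.false_eq_true, if_false]
      rw [h1]
      conv_lhs => rw [hsplit]
      rw [aWordLoop_run, incrIter_closed]
      rw [bWord]
      have hstate :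
          (if (cs.takeWhile (· == c)).length = 0 then d
            else d.insert (String.ofList [c])
              (d.getD (String.ofList [c]) 0 + ((cs.takeWhile (· == c)).length : Int))) =
          (if (cs.takeWhile (· == c)).length > 0 then
            d.insert (String.ofList [c])
              (d.getD (String.ofList [c]) 0 + ((cs.takeWhile (· == c)).length : Int))
          else d) := by
        by_cases hk : (cs.takeWhile (· == c)).length = 0 <;> simp [hk]
      rw [hstate]
      set d' := (if (cs.takeWhile (· == c)).length > 0 then
            d.insert (String.ofList [c])
              (d.getD (String.ofList [c]) 0 + ((cs.takeWhile (· == c)).length : Int))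
          else d) with hd'
      have hlen : (cs.dropWhile (· == c)).length ≤ n := by
        have := List.length_dropWhile_le (· == c) cs
        have : (cs.dropWhile (· == c)).length ≤ cs.length := this
        simp only [List.length_cons] at hw
        omega
      cases hrest : cs.dropWhile (· == c) with
      | nil => simp [aWordLoop, bWord]
      | cons r rs =>
        have hr : (r == c) = false := by
          have hne : cs.dropWhile (· == c) ≠ [] := by simp [hrest]
          have := List.head_dropWhile_not (· == c) hne
          simpa [hrest] using this
        have hrc : r ≠ c := by simpa using hr
        have hrs : (String.ofList [r] == String.ofList [c]) = false := by
          simp only [beq_eq_false_iff_ne, ne_eq]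
          intro h; exact hrc (sOf_inj h)
        have hre : (String.ofList [r] == "") = false := sOf_ne_empty r
        rw [aWordLoop_skip r rs d' (String.ofList [c]) "" hrs hre]
        rw [← hrest] at *
        exact ih _ d' hlen

theorem fold_equiv (ws : List (List Char)) : ∀ (d : PySem.Dict String Int),
    ws.foldl (fun d w => (aWordLoop (d, "") w).1) d = ws.foldl bWord d := by
  induction ws with
  | nil => intro d; rfl
  | cons w ws ih =>
    intro d
    simp only [List.foldl_cons]
    rw [word_equiv w.length w d (le_refl _)]
    exact ih _

-- ===== VERDICT (by name: the statement is the Claim_ definition above) =====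
theorem get_doubles_spec : Claim_equal_get_doubles := by
  intro text _
  unfold Spec_get_doubles get_doubles get_doubles_alt
  rw [fold_equiv]
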